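-- pv_equiv track=rewrite | github.com/YaKoR1333/Codewars | 5-kyu/Simple Fun #178: Faulty Odometer.py | count_number4
-- ===== SOURCE A (Python) =====
-- def count_round_range(k):
--     return 10**k - 9**k
--
-- def count_number4(n):
--     if n < 10:
--         return 1 if n >= 4 else 0
--
--     s = str(n)
--     digits = len(s)
--     hi_digit, lo_n = int(s[0]), int(s[1:])
--     if hi_digit < 4:
--         return hi_digit * count_round_range(digits - 1) + count_number4(lo_n)
--     elif hi_digit == 4:
--         return hi_digit * count_round_range(digits - 1) + lo_n + 1
--     elif hi_digit > 4:
--         return (hi_digit - 1) * count_round_range(digits - 1) + 10 ** (digits - 1) + count_number4(lo_n)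
-- ===== SOURCE B (Python) =====
-- def count_number4(n):
--     if n < 0:
--         return 0
--     # digits of n, least significant first
--     ds = []
--     m = n
--     while True:
--         ds.append(m % 10)
--         m //= 10
--         if m == 0:
--             break
--     no4 = 0  # integers in [0, n] that contain no digit 4
--     for i in range(len(ds) - 1, -1, -1):
--         d = ds[i]
--         no4 += (d - 1 if d > 4 else d) * 9 ** i
--         if d == 4:
--             break
--     else:
--         no4 += 1  # n itself contains no digit 4
--     return n + 1 - no4
-- ===== Notes on version B (the rewrite author's own statement) =====
-- stated objective: alternative
-- what changed: A recursively peels the leading digit of str(n), re-stringifying at every level; B counts the complement (integers from zero to n with no digit four) in a single arithmetic pass over n's digits, subtracting that count from the size of the range, with no strings and no recursion.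
import Mathlib
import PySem

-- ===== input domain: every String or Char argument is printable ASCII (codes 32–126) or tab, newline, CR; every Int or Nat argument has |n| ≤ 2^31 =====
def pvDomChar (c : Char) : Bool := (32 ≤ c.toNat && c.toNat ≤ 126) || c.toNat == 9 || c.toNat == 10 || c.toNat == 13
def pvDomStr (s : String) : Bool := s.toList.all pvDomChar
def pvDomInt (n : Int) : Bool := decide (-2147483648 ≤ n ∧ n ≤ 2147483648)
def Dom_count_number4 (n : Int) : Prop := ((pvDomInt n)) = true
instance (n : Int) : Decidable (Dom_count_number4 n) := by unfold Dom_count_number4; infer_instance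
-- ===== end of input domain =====

-- B replaces A's per-level string/recursion scheme by complementary counting: one arithmetic
-- pass over n's digits counts how many integers of the range contain no digit four, and
-- subtracts that count from the size of the range.

-- ===== PORT A =====
def count_round_range (k : Nat) : Int := 10 ^ k - 9 ^ k
-- `k` is `digits - 1`, a length, hence Nat (Python's `10**k` is only reached with k ≥ 1 here).

-- hand port of Python's int() restricted to the inputs it receives in this program:
-- nonempty all-digit strings (slices of str(n) for n ≥ 10), where it is exact.
def pyIntDigits (cs : List Char) : Int :=
  cs.foldl (fun a c => 10 * a + ((c.toNat - 48 : Nat) : Int)) 0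

-- ---- lemmas the port needs for termination (cited in decreasing_by) ----
theorem tdc_acc (f : Nat) : ∀ (n : Nat) (l : List Char),
    Nat.toDigitsCore 10 f n l = Nat.toDigitsCore 10 f n [] ++ l := by
  induction f with
  | zero => intro n l; simp [Nat.toDigitsCore]
  | succ f ih =>
    intro n l
    simp only [Nat.toDigitsCore]
    by_cases h : n / 10 = 0
    · simp [h]
    · simp only [h, if_false]
      rw [ih (n / 10) ((n % 10).digitChar :: l), ih (n / 10) [(n % 10).digitChar]]
      simp

theorem tdc_fuel (n : Nat) : ∀ (f f' : Nat), n < f → n < f' →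
    Nat.toDigitsCore 10 f n [] = Nat.toDigitsCore 10 f' n [] := by
  induction n using Nat.strong_induction_on with
  | _ n ih =>
    intro f f' hf hf'
    obtain ⟨g, rfl⟩ : ∃ g, f = g + 1 := ⟨f - 1, by omega⟩
    obtain ⟨g', rfl⟩ : ∃ g', f' = g' + 1 := ⟨f' - 1, by omega⟩
    simp only [Nat.toDigitsCore]
    by_cases h : n / 10 = 0
    · simp [h]
    · have hn : 10 ≤ n := by
        rcases Nat.lt_or_ge n 10 with h10 | h10
        · exact absurd (Nat.div_eq_of_lt h10) h
        · exact h10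
      have hdiv : n / 10 < n := Nat.div_lt_self (by omega) (by omega)
      simp only [h, if_false]
      rw [tdc_acc g, tdc_acc g']
      rw [ih (n / 10) hdiv g g' (by omega) (by omega)]

theorem td_small (m : Nat) (h : m < 10) : Nat.toDigits 10 m = [Nat.digitChar m] := by
  simp [Nat.toDigits, Nat.toDigitsCore, Nat.div_eq_of_lt h, Nat.mod_eq_of_lt h]

theorem td_big (m : Nat) (h : 10 ≤ m) :
    Nat.toDigits 10 m = Nat.toDigits 10 (m / 10) ++ [Nat.digitChar (m % 10)] := by
  have hne : ¬ m / 10 = 0 := by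
    intro h0; have := Nat.div_eq_of_lt (show m < 10 by omega); omega
  simp only [Nat.toDigits, Nat.toDigitsCore]
  simp only [hne, if_false]
  rw [tdc_acc m (m / 10) [(m % 10).digitChar]]
  congr 1
  exact tdc_fuel (m / 10) m (m / 10 + 1) (Nat.div_lt_self (by omega) (by omega)) (by omega)

theorem dv_digitChar (r : Nat) (h : r < 10) : (Nat.digitChar r).toNat - 48 = r := by
  interval_cases r <;> decide

theorem td_chars (m : Nat) : ∀ c ∈ Nat.toDigits 10 m, c.toNat - 48 < 10 := by
  induction m using Nat.strong_induction_on with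
  | _ m ih =>
    intro c hc
    by_cases h : m < 10
    · rw [td_small m h] at hc
      simp at hc
      subst hc
      rw [dv_digitChar m h]; exact h
    · rw [td_big m (by omega)] at hc
      rcases List.mem_append.mp hc with h1 | h2
      · exact ih (m / 10) (Nat.div_lt_self (by omega) (by omega)) c h1
      · simp at h2
        subst h2
        rw [dv_digitChar _ (Nat.mod_lt _ (by omega))]
        exact Nat.mod_lt _ (by omega)

theorem td_len_low (m : Nat) (h : 1 ≤ m) :
    10 ^ ((Nat.toDigits 10 m).length - 1) ≤ m := by
  induction m using Nat.strong_induction_on with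
  | _ m ih =>
    by_cases h10 : m < 10
    · rw [td_small m h10]; simpa using h
    · rw [td_big m (by omega)]
      have hd : m / 10 < m := Nat.div_lt_self (by omega) (by omega)
      have h1 : 1 ≤ m / 10 := by omega
      have := ih (m / 10) hd h1
      have hlen : 1 ≤ (Nat.toDigits 10 (m / 10)).length := by
        by_cases hq : m / 10 < 10
        · rw [td_small _ hq]; simp
        · rw [td_big _ (by omega)]; simp
      simp only [List.length_append, List.length_cons, List.length_nil]
      have heq : (Nat.toDigits 10 (m / 10)).length + 1 - 1
          = ((Nat.toDigits 10 (m / 10)).length - 1) + 1 := by omega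
      rw [heq, pow_succ]
      calc 10 ^ ((Nat.toDigits 10 (m / 10)).length - 1) * 10 ≤ (m / 10) * 10 :=
            Nat.mul_le_mul_right _ this
        _ ≤ m := by omega

theorem pyfold_bounds (cs : List Char) : ∀ (a : Int), 0 ≤ a →
    (∀ c ∈ cs, c.toNat - 48 < 10) →
    0 ≤ cs.foldl (fun a c => 10 * a + ((c.toNat - 48 : Nat) : Int)) a ∧
    cs.foldl (fun a c => 10 * a + ((c.toNat - 48 : Nat) : Int)) a < (a + 1) * 10 ^ cs.length := by
  induction cs with
  | nil => intro a ha _; simpa using ha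
  | cons c cs ih =>
    intro a ha hd
    have hc : ((c.toNat - 48 : Nat) : Int) < 10 := by
      have := hd c (by simp); omega
    have hc0 : (0 : Int) ≤ ((c.toNat - 48 : Nat) : Int) := by positivity
    have ha' : 0 ≤ 10 * a + ((c.toNat - 48 : Nat) : Int) := by omega
    obtain ⟨h1, h2⟩ := ih (10 * a + ((c.toNat - 48 : Nat) : Int)) ha'
      (fun x hx => hd x (by simp [hx]))
    refine ⟨by simpa using h1, ?_⟩
    simp only [List.foldl_cons, List.length_cons]
    calc List.foldl _ (10 * a + ((c.toNat - 48 : Nat) : Int)) cs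
        < (10 * a + ((c.toNat - 48 : Nat) : Int) + 1) * 10 ^ cs.length := h2
      _ ≤ ((a + 1) * 10) * 10 ^ cs.length := by
          have : 10 * a + ((c.toNat - 48 : Nat) : Int) + 1 ≤ (a + 1) * 10 := by omega
          exact mul_le_mul_of_nonneg_right this (by positivity)
      _ = (a + 1) * 10 ^ (cs.length + 1) := by ring

theorem toChars_nonneg (n : Int) (h : 0 ≤ n) :
    PySem.Int.toChars n = Nat.toDigits 10 n.toNat := by
  simp [PySem.Int.toChars, show ¬ n < 0 by omega]

-- str(n)[1:] parses (as an int) to a value in [0, n) whenever n ≥ 10: used for termination.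
theorem lo_bound (n : Int) (h : ¬ n < 10) :
    0 ≤ pyIntDigits (PySem.List.slice (PySem.Int.toChars n) (some 1) none) ∧
    pyIntDigits (PySem.List.slice (PySem.Int.toChars n) (some 1) none) < n := by
  rw [PySem.List.slice_from_one, toChars_nonneg n (by omega)]
  set m := n.toNat with hm
  have hmn : (m : Int) = n := Int.toNat_of_nonneg (by omega)
  have hm10 : 10 ≤ m := by omega
  have hdig : ∀ c ∈ (Nat.toDigits 10 m).tail, c.toNat - 48 < 10 :=
    fun c hc => td_chars m c (List.mem_of_mem_tail hc)
  obtain ⟨h0, h1⟩ := pyfold_bounds (Nat.toDigits 10 m).tail 0 le_rfl hdig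
  refine ⟨h0, ?_⟩
  have hlow := td_len_low m (by omega)
  have hlen : (Nat.toDigits 10 m).tail.length = (Nat.toDigits 10 m).length - 1 := by
    simp [List.length_tail]
  rw [hlen] at h1
  have : (10 : Int) ^ ((Nat.toDigits 10 m).length - 1) ≤ (m : Int) := by
    calc (10 : Int) ^ ((Nat.toDigits 10 m).length - 1)
        = ((10 ^ ((Nat.toDigits 10 m).length - 1) : Nat) : Int) := by push_cast; ring
      _ ≤ (m : Int) := by exact_mod_cast hlow
  simp only [pyIntDigits]
  omega

def count_number4 (n : Int) : Int :=
  if hlt : n < 10 then (if 4 ≤ n then 1 else 0)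
  else
    let s := PySem.Int.toChars n                              -- s = str(n)
    let digits := s.length                                    -- digits = len(s)
    let hi := pyIntDigits [(PySem.List.pyGet? s 0).getD '0']  -- int(s[0]); s ≠ "" so s[0] never raises
    let lo := pyIntDigits (PySem.List.slice s (some 1) none)  -- int(s[1:])
    if hi < 4 then hi * count_round_range (digits - 1) + count_number4 lo
    else if hi = 4 then hi * count_round_range (digits - 1) + lo + 1
    else (hi - 1) * count_round_range (digits - 1) + 10 ^ (digits - 1) + count_number4 lo
termination_by n.toNat
decreasing_by
  · have := lo_bound n hlt; omega
  · have := lo_bound n hlt; omega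

-- ===== PORT B =====
-- digits of n, least significant first (B's while-loop; it only runs on n ≥ 0, hence Nat here)
def bdigits (m : Nat) : List Int :=
  if m < 10 then [(m : Int)] else ((m % 10 : Nat) : Int) :: bdigits (m / 10)
decreasing_by exact Nat.div_lt_self (by omega) (by omega)

-- B's for-loop over the digit list, most significant first; `rest.length` is the loop's `i`;
-- the `d = 4` case is the `break`, the `[]` case is the for-else `no4 += 1`.
def altCount : List Int → Int
  | [] => 1
  | d :: rest =>
      (if d > 4 then d - 1 else d) * 9 ^ rest.length + (if d = 4 then 0 else altCount rest)

def count_number4_alt (n : Int) : Int :=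
  if n < 0 then 0 else n + 1 - altCount ((bdigits n.toNat).reverse)

-- ===== PRECONDITION & SPEC =====
def Spec_count_number4 (n : Int) (out : Int) : Prop := out = count_number4_alt n
instance (n : Int) (out : Int) : Decidable (Spec_count_number4 n out) := by unfold Spec_count_number4; infer_instance

-- ===== CLAIM (what is proved, stated in full; the proofs are below) =====
def Claim_equal_count_number4 : Prop := ∀ (n : Int), Dom_count_number4 n → Spec_count_number4 n (count_number4 n)

-- ===== LEMMAS AND PROOFS =====

-- LSB-first digits of lo, padded with zeros to width exactly k
def padL : Nat → Nat → List Nat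
  | 0, _ => []
  | k + 1, lo => lo % 10 :: padL k (lo / 10)

theorem padL_length (k : Nat) : ∀ lo, (padL k lo).length = k := by
  induction k with
  | zero => intro lo; rfl
  | succ k ih => intro lo; simp [padL, ih]

theorem padL_zero (k : Nat) : padL k 0 = List.replicate k 0 := by
  induction k with
  | zero => rfl
  | succ k ih => simp [padL, ih, List.replicate_succ]

theorem padL_split (w : Nat) : ∀ (k lo : Nat), w ≤ k → lo < 10 ^ w →
    padL k lo = padL w lo ++ List.replicate (k - w) 0 := by
  induction w with
  | zero =>
    intro k lo hk hlo
    have : lo = 0 := by simpa using hlo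
    subst this
    simp [padL, padL_zero]
  | succ w ih =>
    intro k lo hk hlo
    obtain ⟨k', rfl⟩ : ∃ k', k = k' + 1 := ⟨k - 1, by omega⟩
    have hlo' : lo / 10 < 10 ^ w := by
      rw [Nat.div_lt_iff_lt_mul (by omega)]
      calc lo < 10 ^ (w + 1) := hlo
        _ = 10 ^ w * 10 := by ring
    simp only [padL, List.cons_append, List.cons.injEq, true_and]
    rw [ih k' (lo / 10) (by omega) hlo']
    congr 2
    omega

theorem padL_decomp (k : Nat) : ∀ (h lo : Nat), h < 10 → lo < 10 ^ k →
    padL (k + 1) (h * 10 ^ k + lo) = padL k lo ++ [h] := by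
  induction k with
  | zero =>
    intro h lo _ hlo
    have : lo = 0 := by simpa using hlo
    subst this
    simp [padL, Nat.mod_eq_of_lt ‹h < 10›]
  | succ k ih =>
    intro h lo hh hlo
    have hmod : (h * 10 ^ (k + 1) + lo) % 10 = lo % 10 := by
      have : h * 10 ^ (k + 1) + lo = 10 * (h * 10 ^ k) + lo := by ring
      rw [this, Nat.mul_add_mod]
    have hdiv : (h * 10 ^ (k + 1) + lo) / 10 = h * 10 ^ k + lo / 10 := by
      have : h * 10 ^ (k + 1) + lo = 10 * (h * 10 ^ k) + lo := by ring
      rw [this, Nat.mul_add_div (by omega)]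
    have hlo' : lo / 10 < 10 ^ k := by
      rw [Nat.div_lt_iff_lt_mul (by omega)]
      calc lo < 10 ^ (k + 1) := hlo
        _ = 10 ^ k * 10 := by ring
    show (h * 10 ^ (k + 1) + lo) % 10 :: padL (k + 1) ((h * 10 ^ (k + 1) + lo) / 10) = _
    rw [hmod, hdiv, ih h (lo / 10) hh hlo']
    simp [padL]

theorem td_of_decomp (k : Nat) : ∀ (h lo : Nat), 1 ≤ h → h < 10 → lo < 10 ^ k →
    Nat.toDigits 10 (h * 10 ^ k + lo)
      = Nat.digitChar h :: ((padL k lo).reverse.map Nat.digitChar) := by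
  induction k with
  | zero =>
    intro h lo h1 h10 hlo
    have : lo = 0 := by simpa using hlo
    subst this
    simp [td_small h h10, padL]
  | succ k ih =>
    intro h lo h1 h10 hlo
    have hge : 10 ≤ h * 10 ^ (k + 1) + lo := by
      have h1 : 1 ≤ 10 ^ k := Nat.one_le_pow _ _ (by omega)
      have hpow : 10 ≤ 10 ^ (k + 1) := by
        calc 10 = 10 * 1 := by ring
          _ ≤ 10 * 10 ^ k := by omega
          _ = 10 ^ (k + 1) := by ring
      nlinarith
    have hmod : (h * 10 ^ (k + 1) + lo) % 10 = lo % 10 := by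
      have : h * 10 ^ (k + 1) + lo = 10 * (h * 10 ^ k) + lo := by ring
      rw [this, Nat.mul_add_mod]
    have hdiv : (h * 10 ^ (k + 1) + lo) / 10 = h * 10 ^ k + lo / 10 := by
      have : h * 10 ^ (k + 1) + lo = 10 * (h * 10 ^ k) + lo := by ring
      rw [this, Nat.mul_add_div (by omega)]
    have hlo' : lo / 10 < 10 ^ k := by
      rw [Nat.div_lt_iff_lt_mul (by omega)]
      calc lo < 10 ^ (k + 1) := hlo
        _ = 10 ^ k * 10 := by ring
    rw [td_big _ hge, hmod, hdiv, ih h (lo / 10) h1 h10 hlo']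
    simp [padL]

theorem pyInt_padL (k : Nat) : ∀ lo, lo < 10 ^ k →
    pyIntDigits ((padL k lo).reverse.map Nat.digitChar) = (lo : Int) := by
  induction k with
  | zero =>
    intro lo hlo
    have : lo = 0 := by simpa using hlo
    subst this
    rfl
  | succ k ih =>
    intro lo hlo
    have hlo' : lo / 10 < 10 ^ k := by
      rw [Nat.div_lt_iff_lt_mul (by omega)]
      calc lo < 10 ^ (k + 1) := hlo
        _ = 10 ^ k * 10 := by ring
    simp only [padL, List.reverse_cons, List.map_append, List.map_cons, List.map_nil]
    simp only [pyIntDigits, List.foldl_append, List.foldl_cons, List.foldl_nil]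
    have hih := ih (lo / 10) hlo'
    simp only [pyIntDigits] at hih
    rw [hih, dv_digitChar (lo % 10) (Nat.mod_lt _ (by omega))]
    push_cast
    omega

theorem bd_eq (m : Nat) :
    bdigits m = (padL ((bdigits m).length) m).map (fun d : Nat => (d : Int)) := by
  induction m using Nat.strong_induction_on with
  | _ m ih =>
    by_cases h : m < 10
    · rw [bdigits]
      simp [h, padL, Nat.mod_eq_of_lt h]
    · rw [bdigits]
      simp only [h, if_false]
      have := ih (m / 10) (Nat.div_lt_self (by omega) (by omega))
      simp only [List.length_cons, padL, List.map_cons]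
      rw [← this]

theorem bd_lt (m : Nat) : m < 10 ^ (bdigits m).length := by
  induction m using Nat.strong_induction_on with
  | _ m ih =>
    by_cases h : m < 10
    · rw [bdigits]; simp [h]
    · rw [bdigits]
      simp only [h, if_false, List.length_cons]
      have := ih (m / 10) (Nat.div_lt_self (by omega) (by omega))
      rw [pow_succ]
      have h2 : m / 10 + 1 ≤ 10 ^ (bdigits (m / 10)).length := this
      have : m < (m / 10 + 1) * 10 := by omega
      calc m < (m / 10 + 1) * 10 := this
        _ ≤ 10 ^ (bdigits (m / 10)).length * 10 := Nat.mul_le_mul_right _ h2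
  
theorem bd_low (m : Nat) (h : 1 ≤ m) : 10 ^ ((bdigits m).length - 1) ≤ m := by
  induction m using Nat.strong_induction_on with
  | _ m ih =>
    by_cases h10 : m < 10
    · rw [bdigits]; simpa [h10] using h
    · rw [bdigits]
      simp only [h10, if_false, List.length_cons]
      have hd : m / 10 < m := Nat.div_lt_self (by omega) (by omega)
      have := ih (m / 10) hd (by omega)
      have hlen : 1 ≤ (bdigits (m / 10)).length := by
        rw [bdigits]; by_cases hq : m / 10 < 10 <;> simp [hq]
      have heq : (bdigits (m / 10)).length + 1 - 1
          = ((bdigits (m / 10)).length - 1) + 1 := by omega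
      rw [heq, pow_succ]
      calc 10 ^ ((bdigits (m / 10)).length - 1) * 10 ≤ (m / 10) * 10 :=
            Nat.mul_le_mul_right _ this
        _ ≤ m := by omega

theorem bd_len_le (m : Nat) : ∀ j, 1 ≤ j → m < 10 ^ j → (bdigits m).length ≤ j := by
  induction m using Nat.strong_induction_on with
  | _ m ih =>
    intro j hj hm
    by_cases h : m < 10
    · rw [bdigits]; simpa [h] using hj
    · rw [bdigits]
      simp only [h, if_false, List.length_cons]
      have hj2 : 2 ≤ j := by
        by_contra hc
        have : j = 1 := by omega
        subst this
        simp at hm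
        omega
      have hq : m / 10 < 10 ^ (j - 1) := by
        rw [Nat.div_lt_iff_lt_mul (by omega)]
        calc m < 10 ^ j := hm
          _ = 10 ^ (j - 1) * 10 := by
              rw [← pow_succ]
              congr 1
              omega
      have := ih (m / 10) (Nat.div_lt_self (by omega) (by omega)) (j - 1) (by omega) hq
      omega

theorem alt_replicate (j : Nat) : ∀ l : List Int,
    altCount (List.replicate j 0 ++ l) = altCount l := by
  induction j with
  | zero => intro l; rfl
  | succ j ih =>
    intro l
    rw [List.replicate_succ]
    simp only [List.cons_append, altCount]
    rw [ih l]
    norm_num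

theorem main_eq (m : Nat) :
    count_number4 (m : Int) = (m : Int) + 1 - altCount ((bdigits m).reverse) := by
  induction m using Nat.strong_induction_on with
  | _ m ih =>
    by_cases h10 : m < 10
    · rw [count_number4]
      rw [dif_pos (by exact_mod_cast h10)]
      rw [bdigits]
      simp only [h10, if_true, List.reverse_cons, List.reverse_nil, List.nil_append]
      simp only [altCount, List.length_nil, pow_zero, mul_one]
      split_ifs <;> omega
    · -- decompose m = h * 10^k + lo with k = (number of digits) - 1
      set w := (bdigits m).length with hw
      have hw2 : 2 ≤ w := by
        by_contra hc
        have hblt := bd_lt m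
        rw [← hw] at hblt
        have hp : 10 ^ w ≤ 10 ^ 1 := Nat.pow_le_pow_right (by omega) (by omega)
        simp at hp
        omega
      set k := w - 1 with hk
      set h := m / 10 ^ k with hh
      set lo := m % 10 ^ k with hlo
      have hm_eq : m = h * 10 ^ k + lo := by
        have h0 := Nat.div_add_mod m (10 ^ k)
        rw [hh, hlo]
        linarith
      have hlo_lt : lo < 10 ^ k := Nat.mod_lt _ (by positivity)
      have hh10 : h < 10 := by
        have := bd_lt m
        rw [← hw] at this
        have hwk : w = k + 1 := by omega
        rw [hwk, pow_succ] at this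
        rw [hh]
        rw [Nat.div_lt_iff_lt_mul (by positivity)]
        calc m < 10 ^ k * 10 := this
          _ = 10 * 10 ^ k := by ring
      have hh1 : 1 ≤ h := by
        have := bd_low m (by omega)
        rw [← hw] at this
        rw [hh]
        exact Nat.one_le_div_iff (by positivity) |>.mpr this
      -- A's string pieces
      have hS : Nat.toDigits 10 m = Nat.digitChar h :: ((padL k lo).reverse.map Nat.digitChar) := by
        conv_lhs => rw [hm_eq]
        exact td_of_decomp k h lo hh1 hh10 hlo_lt
      have hlo_m : lo < m := by
        have : 10 ^ k ≤ m := Nat.one_le_div_iff (by positivity) |>.mp hh1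
        omega
      have hih := ih lo hlo_m
      -- B's digit list
      have hBL : (bdigits m).reverse
          = (h : Int) :: ((padL k lo).map (fun d : Nat => (d : Int))).reverse := by
        rw [bd_eq m, ← hw]
        have hwk : w = k + 1 := by omega
        rw [hwk]
        conv_lhs => rw [hm_eq]
        rw [padL_decomp k h lo hh10 hlo_lt]
        simp
      have hT : ((padL k lo).map (fun d : Nat => (d : Int))).reverse
          = List.replicate (k - (bdigits lo).length) 0 ++ (bdigits lo).reverse := by
        have hwl : (bdigits lo).length ≤ k := bd_len_le lo k (by omega) hlo_lt
        rw [padL_split (bdigits lo).length k lo hwl (bd_lt lo)]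
        rw [List.map_append, List.reverse_append]
        congr 1
        · simp
        · rw [← bd_eq lo]
      have hAlt : altCount ((bdigits m).reverse)
          = (if (h : Int) > 4 then (h : Int) - 1 else (h : Int)) * 9 ^ k
            + (if (h : Int) = 4 then 0 else altCount ((bdigits lo).reverse)) := by
        rw [hBL]
        simp only [altCount, List.length_reverse, List.length_map, padL_length]
        rw [hT, alt_replicate]
      -- evaluate A
      rw [count_number4]
      rw [dif_neg (show ¬ (m : Int) < 10 by exact_mod_cast h10)]
      simp only
      rw [toChars_nonneg (m : Int) (by positivity), Int.toNat_natCast, hS]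
      rw [PySem.List.slice_from_one]
      simp only [List.tail_cons, List.length_cons, List.length_map, List.length_reverse,
        padL_length, PySem.List.pyGet?_zero_cons, Option.getD_some]
      have hhi : pyIntDigits [Nat.digitChar h] = (h : Int) := by
        simp [pyIntDigits, dv_digitChar h hh10]
      have hloI : pyIntDigits ((padL k lo).reverse.map Nat.digitChar) = (lo : Int) :=
        pyInt_padL k lo hlo_lt
      rw [hhi, hloI]
      have hkk : k + 1 - 1 = k := by omega
      rw [hkk]
      -- branch arithmetic
      have hmI : (m : Int) = (h : Int) * 10 ^ k + (lo : Int) := by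
        rw [hm_eq]; push_cast; ring
      rw [hih, hAlt, hmI]
      unfold count_round_range
      rcases lt_trichotomy ((h : Int)) 4 with hc | hc | hc
      · rw [if_pos hc, if_neg (show ¬ (4:Int) < (h:Int) by omega),
          if_neg (show ¬ (h:Int) = 4 by omega)]
        ring
      · rw [if_neg (show ¬ (h:Int) < 4 by omega), if_pos hc,
          if_neg (show ¬ (4:Int) < (h:Int) by omega), if_pos hc]
        ring
      · rw [if_neg (show ¬ (h:Int) < 4 by omega),
          if_neg (show ¬ (h:Int) = 4 by omega), if_pos hc,
          if_neg (show ¬ (h:Int) = 4 by omega)]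
        ring

-- ===== VERDICT (by name: the statement is the Claim_ definition above) =====
theorem count_number4_spec : Claim_equal_count_number4 := by
  intro n _
  unfold Spec_count_number4 count_number4_alt
  by_cases hneg : n < 0
  · rw [if_pos hneg, count_number4, dif_pos (by omega), if_neg (by omega)]
  · rw [if_neg hneg]
    obtain ⟨m, rfl⟩ : ∃ m : Nat, n = (m : Int) := ⟨n.toNat, (Int.toNat_of_nonneg (by omega)).symm⟩
    rw [main_eq m, Int.toNat_natCast]
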